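-- pv_equiv track=rewrite | github.com/AbhishekBhosale46/DSL | DSL/Assignment1.py | subprob4
-- ===== SOURCE A (Python) =====
-- def listToSet(lst):
--     newList = []
--     for i in lst:
--         if i not in newList:
--             newList.append(i)
--     return newList
--
-- def intersection(seta, setb):
--     newList = []
--     seta = listToSet(seta)
--     setb = listToSet(setb)
--     for a in seta:
--         if a in setb:
--             newList.append(a)
--     return newList
--
-- def subprob4(seta, setb, setc):
--     seta = listToSet(seta)
--     setb = listToSet(setb)
--     setc = listToSet(setc)
--     newList = intersection(seta, setc)
--     lst = []
--     for i in newList: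
--         if i not in setb:
--             lst.append(i)
--     return len(lst)
-- ===== SOURCE B (Python) =====
-- def subprob4(seta, setb, setc):
--     flags = {}
--     for x in seta:
--         a, b, c = flags.get(x, (False, False, False))
--         flags[x] = (True, b, c)
--     for x in setb:
--         a, b, c = flags.get(x, (False, False, False))
--         flags[x] = (a, True, c)
--     for x in setc:
--         a, b, c = flags.get(x, (False, False, False))
--         flags[x] = (a, b, True)
--     return sum(1 for (a, b, c) in flags.values() if a and c and not b)
-- ===== Notes on version B (the rewrite author's own statement) =====
-- stated objective: faster
-- what changed: Replaces A's staged dedup lists, quadratic intersection and filter loops with a single dict of (in_a,in_b,in_c) flag triples built in one sweep over the three lists, then counts values with in_a and in_c and not in_b.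
import Mathlib
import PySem

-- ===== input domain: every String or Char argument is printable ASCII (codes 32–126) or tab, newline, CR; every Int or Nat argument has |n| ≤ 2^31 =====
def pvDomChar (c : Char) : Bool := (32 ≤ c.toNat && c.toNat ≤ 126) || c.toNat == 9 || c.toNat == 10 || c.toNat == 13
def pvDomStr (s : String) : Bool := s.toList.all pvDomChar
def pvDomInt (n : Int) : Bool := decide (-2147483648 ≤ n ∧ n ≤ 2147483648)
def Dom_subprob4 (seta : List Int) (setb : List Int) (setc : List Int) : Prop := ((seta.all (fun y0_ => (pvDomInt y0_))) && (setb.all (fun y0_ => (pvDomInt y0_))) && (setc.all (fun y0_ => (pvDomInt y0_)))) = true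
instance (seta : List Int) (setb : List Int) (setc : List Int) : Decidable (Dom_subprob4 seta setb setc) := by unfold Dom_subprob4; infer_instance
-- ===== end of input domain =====

-- B replaces A's staged dedup/intersection/filter passes by one dict of membership-flag
-- triples built in a single sweep over the three lists, then counts the qualifying values.

-- ===== PORT A =====
-- def listToSet(lst): newList=[]; for i in lst: if i not in newList: newList.append(i); return newList
def listToSetA (lst : List Int) : List Int :=
  lst.foldl (fun newList i => if newList.contains i then newList else newList ++ [i]) []

-- def intersection(seta, setb): newList=[]; seta=listToSet(seta); setb=listToSet(setb); for a in seta: if a in setb: newList.append(a)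
def intersectionA (seta : List Int) (setb : List Int) : List Int :=
  let seta := listToSetA seta
  let setb := listToSetA setb
  seta.foldl (fun newList a => if setb.contains a then newList ++ [a] else newList) []

def subprob4 (seta : List Int) (setb : List Int) (setc : List Int) : Int :=
  let seta := listToSetA seta
  let setb := listToSetA setb
  let setc := listToSetA setc
  let newList := intersectionA seta setc
  let lst := newList.foldl (fun lst i => if setb.contains i then lst else lst ++ [i]) []
  (lst.length : Int)

-- ===== PORT B =====
-- flags = {}; three loops, each flags.get(x, (False,False,False)) then sets one component True;
-- then sum(1 for (a,b,c) in flags.values() if a and c and not b)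
def subprob4_alt (seta : List Int) (setb : List Int) (setc : List Int) : Int :=
  let flags : PySem.Dict Int (Bool × Bool × Bool) := PySem.Dict.empty
  let flags := seta.foldl (fun d x =>
    let p := PySem.Dict.getD d x (false, false, false)
    PySem.Dict.insert d x (true, p.2.1, p.2.2)) flags
  let flags := setb.foldl (fun d x =>
    let p := PySem.Dict.getD d x (false, false, false)
    PySem.Dict.insert d x (p.1, true, p.2.2)) flags
  let flags := setc.foldl (fun d x =>
    let p := PySem.Dict.getD d x (false, false, false)
    PySem.Dict.insert d x (p.1, p.2.1, true)) flags
  (PySem.Dict.values flags).foldl (fun n p => if p.1 && p.2.2 && !p.2.1 then n + 1 else n) (0 : Int)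

-- ===== PRECONDITION & SPEC =====
def Spec_subprob4 (seta : List Int) (setb : List Int) (setc : List Int) (out : Int) : Prop := out = subprob4_alt seta setb setc
instance (seta : List Int) (setb : List Int) (setc : List Int) (out : Int) : Decidable (Spec_subprob4 seta setb setc out) := by unfold Spec_subprob4; infer_instance

-- ===== CLAIM (what is proved, stated in full; the proofs are below) =====
def Claim_equal_subprob4 : Prop := ∀ (seta : List Int) (setb : List Int) (setc : List Int), Dom_subprob4 seta setb setc → Spec_subprob4 seta setb setc (subprob4 seta setb setc)

-- ===== LEMMAS AND PROOFS =====

theorem listToSetA_eq_ofList (lst : List Int) : listToSetA lst = PySem.Set.ofList lst := by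
  rw [PySem.Set.ofList_eq_foldl]; rfl

-- the a-flag loop: sets .1 to true on keys of the list, preserves .2.1 and .2.2
theorem getD_foldA (l : List Int) (d : PySem.Dict Int (Bool × Bool × Bool)) (y : Int) :
    (l.foldl (fun d x =>
      let p := PySem.Dict.getD d x (false, false, false)
      PySem.Dict.insert d x (true, p.2.1, p.2.2)) d).getD y (false, false, false)
    = (if y ∈ l then true else (d.getD y (false, false, false)).1,
       (d.getD y (false, false, false)).2.1, (d.getD y (false, false, false)).2.2) := by
  induction l generalizing d with
  | nil => simp
  | cons x xs ih =>
    simp only [List.foldl_cons, ih, PySem.Dict.getD_insert, List.mem_cons]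
    by_cases hx : y = x <;> simp [hx]

theorem getD_foldB (l : List Int) (d : PySem.Dict Int (Bool × Bool × Bool)) (y : Int) :
    (l.foldl (fun d x =>
      let p := PySem.Dict.getD d x (false, false, false)
      PySem.Dict.insert d x (p.1, true, p.2.2)) d).getD y (false, false, false)
    = ((d.getD y (false, false, false)).1,
       if y ∈ l then true else (d.getD y (false, false, false)).2.1,
       (d.getD y (false, false, false)).2.2) := by
  induction l generalizing d with
  | nil => simp
  | cons x xs ih =>
    simp only [List.foldl_cons, ih, PySem.Dict.getD_insert, List.mem_cons]
    by_cases hx : y = x <;> simp [hx]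

theorem getD_foldC (l : List Int) (d : PySem.Dict Int (Bool × Bool × Bool)) (y : Int) :
    (l.foldl (fun d x =>
      let p := PySem.Dict.getD d x (false, false, false)
      PySem.Dict.insert d x (p.1, p.2.1, true)) d).getD y (false, false, false)
    = ((d.getD y (false, false, false)).1, (d.getD y (false, false, false)).2.1,
       if y ∈ l then true else (d.getD y (false, false, false)).2.2) := by
  induction l generalizing d with
  | nil => simp
  | cons x xs ih =>
    simp only [List.foldl_cons, ih, PySem.Dict.getD_insert, List.mem_cons]
    by_cases hx : y = x <;> simp [hx]

-- the counting fold is countP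
theorem foldl_count (p : Bool × Bool × Bool → Bool) (l : List (Bool × Bool × Bool)) (n : Int) :
    l.foldl (fun n q => if p q then n + 1 else n) n = n + (l.countP p : Int) := by
  induction l generalizing n with
  | nil => simp
  | cons q qs ih =>
    by_cases hq : p q <;> simp [hq, ih] <;> ring

-- countP over a deduped concatenation drops the tail if p forces membership in the head
theorem countP_ofList_append (p : Int → Bool) (l m : List Int)
    (h : ∀ x, p x = true → x ∈ l) :
    (PySem.Set.ofList (l ++ m)).countP p = (PySem.Set.ofList l).countP p := by
  rw [PySem.Set.ofList_append, PySem.Set.update_eq_append_filter, List.countP_append]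
  have : ((PySem.Set.ofList m).filter
      (fun y => !(PySem.Set.contains (PySem.Set.ofList l) y))).countP p = 0 := by
    rw [List.countP_eq_zero]
    intro a ha
    simp only [List.mem_filter, PySem.Set.contains, Bool.not_eq_true'] at ha
    intro hp
    have := h a hp
    simp [PySem.Set.mem_ofList, this] at ha
  omega

-- ===== VERDICT (by name: the statement is the Claim_ definition above) =====
theorem subprob4_spec : Claim_equal_subprob4 := by
  intro seta setb setc _
  show subprob4 seta setb setc = subprob4_alt seta setb setc
  -- A side: count over the deduped seta of (∈ setc ∧ ∉ setb)
  have hA : subprob4 seta setb setc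
      = ((PySem.Set.ofList seta).countP
          (fun x => decide (x ∈ setc) && !decide (x ∈ setb)) : Int) := by
    unfold subprob4 intersectionA
    simp only [listToSetA_eq_ofList, PySem.Set.ofList_ofList]
    rw [PySem.List.foldl_append_if_eq_filter]
    rw [show (fun (lst : List Int) (i : Int) =>
          if List.contains (PySem.Set.ofList setb) i = true then lst else lst ++ [i])
        = (fun lst i => if ¬ (List.contains (PySem.Set.ofList setb) i = true) then lst ++ [i] else lst) from by
        funext lst i; exact (ite_not _ _ _).symm]
    rw [PySem.List.foldl_append_ite_eq_filter]
    simp only [List.nil_append, List.filter_filter, ← List.countP_eq_length_filter]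
    congr 2
    funext x
    simp [PySem.Set.mem_ofList, Bool.and_comm]
  -- B side
  have hB : subprob4_alt seta setb setc
      = ((PySem.Set.ofList (seta ++ (setb ++ setc))).countP
          (fun x => decide (x ∈ seta) && decide (x ∈ setc) && !decide (x ∈ setb)) : Int) := by
    unfold subprob4_alt
    have hnd : ((setc.foldl (fun d x =>
        let p := PySem.Dict.getD d x (false, false, false)
        PySem.Dict.insert d x (p.1, p.2.1, true))
        ((setb.foldl (fun d x =>
          let p := PySem.Dict.getD d x (false, false, false)
          PySem.Dict.insert d x (p.1, true, p.2.2))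
          ((seta.foldl (fun d x =>
            let p := PySem.Dict.getD d x (false, false, false)
            PySem.Dict.insert d x (true, p.2.1, p.2.2))
            (PySem.Dict.empty : PySem.Dict Int (Bool × Bool × Bool))))))).keys).Nodup := by
      apply PySem.Dict.nodup_keys_foldl_insert
      apply PySem.Dict.nodup_keys_foldl_insert
      apply PySem.Dict.nodup_keys_foldl_insert
      exact PySem.Dict.nodup_keys_empty
    rw [foldl_count, PySem.Dict.values_eq_map_keys _ hnd (false, false, false)]
    simp only [PySem.Dict.keys_foldl_insert, PySem.Dict.keys_empty,
      PySem.Set.update_nil_left, ← PySem.Set.ofList_append, List.append_assoc]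
    rw [List.countP_map]
    norm_num
    apply List.countP_congr
    intro y _
    simp only [Function.comp, getD_foldC, getD_foldB, getD_foldA,
      PySem.Dict.getD_empty]
    by_cases h1 : y ∈ seta <;> by_cases h2 : y ∈ setb <;> by_cases h3 : y ∈ setc <;>
      simp [h1, h2, h3]
  rw [hA, hB]
  rw [countP_ofList_append _ _ _ (fun x hx => by
        simpa using (Bool.and_elim_left (Bool.and_elim_left hx)))]
  norm_num
  apply List.countP_congr
  intro y hy
  have : y ∈ seta := by rwa [PySem.Set.mem_ofList] at hy
  simp [this]
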